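-- pv_equiv track=rewrite | github.com/LiuWoodsCode/webengine | renderer/css.py | _expand_box_shorthand
-- ===== SOURCE A (Python) =====
-- def _expand_box_shorthand(value: str) -> dict:
--     parts = [p for p in value.split() if p]
--     if not parts:
--         return {}
--     if len(parts) == 1:
--         top = right = bottom = left = parts[0]
--     elif len(parts) == 2:
--         top, right = parts
--         bottom, left = top, right
--     elif len(parts) == 3:
--         top, right, bottom = parts
--         left = right
--     else:
--         top, right, bottom, left = parts[:4]
--     return {
--         "top": top,
--         "right": right,
--         "bottom": bottom,
--         "left": left,
--     }
-- ===== SOURCE B (Python) =====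
-- # Iterative padding: truncate to 4, then grow by the CSS "mirror the opposite side"
-- # rule (sides[i] = sides[i-2], falling back to the first side) until 4 sides exist.
-- def _expand_box_shorthand(value: str) -> dict:
--     sides = value.split()[:4]
--     if not sides:
--         return {}
--     while len(sides) < 4:
--         sides.append(sides[-2] if len(sides) >= 2 else sides[-1])
--     return dict(zip(("top", "right", "bottom", "left"), sides))
-- ===== Notes on version B (the rewrite author's own statement) =====
-- stated objective: alternative
-- what changed: Replaces the chain of len(parts)-branches that unpack whole tuples by truncating to four tokens and then iteratively growing the list with the CSS opposite-side mirroring rule (sides[i] = sides[i-2], first side as fallback) until four sides exist, zipped once into the dict.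
import Mathlib
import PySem

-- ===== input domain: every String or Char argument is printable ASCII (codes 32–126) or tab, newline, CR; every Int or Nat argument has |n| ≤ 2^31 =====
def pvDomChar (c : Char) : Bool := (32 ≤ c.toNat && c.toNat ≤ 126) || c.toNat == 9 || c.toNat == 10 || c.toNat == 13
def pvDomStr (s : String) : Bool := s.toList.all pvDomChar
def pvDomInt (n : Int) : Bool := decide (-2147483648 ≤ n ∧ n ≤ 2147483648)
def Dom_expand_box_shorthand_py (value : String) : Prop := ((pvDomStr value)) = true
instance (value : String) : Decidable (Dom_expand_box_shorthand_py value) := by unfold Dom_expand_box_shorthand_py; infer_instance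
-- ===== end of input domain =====

-- B truncates to four tokens and pads by the opposite-side mirroring rule in a loop instead of branching on len(parts) (objective: alternative decomposition). 


-- ===== PORT A =====
def expand_box_shorthand_py (value : String) : List (String × String) :=
  let parts := (PySem.Str.split₀ value).filter (fun p => p ≠ "")
  if parts = [] then []
  else
    let tuple : String × String × String × String :=
      if parts.length = 1 then
        match parts with
        | t :: _ => (t, t, t, t)
        | _ => ("", "", "", "")   -- unreachable (length = 1)
      else if parts.length = 2 then
        match parts with
        | [t, r] => (t, r, t, r)
        | _ => ("", "", "", "")   -- unreachable
      else if parts.length = 3 then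
        match parts with
        | [t, r, b] => (t, r, b, r)
        | _ => ("", "", "", "")   -- unreachable
      else
        match PySem.List.slice parts none (some 4) with
        | [t, r, b, l] => (t, r, b, l)
        | _ => ("", "", "", "")   -- unreachable (length ≥ 4 here)
    [("top", tuple.1), ("right", tuple.2.1), ("bottom", tuple.2.2.1), ("left", tuple.2.2.2)]

-- ===== PORT B =====
-- the while-loop: while len(sides) < 4: sides.append(sides[-2] if len(sides) >= 2 else sides[-1])
def pvPad (sides : List String) : List String :=
  if sides.length < 4 then
    pvPad (sides ++ [if 2 ≤ sides.length then PySem.List.pyGetD sides (-2) ""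
                     else PySem.List.pyGetD sides (-1) ""])
  else sides
termination_by 4 - sides.length
decreasing_by simp; omega

def expand_box_shorthand_py_alt (value : String) : List (String × String) :=
  let sides := PySem.List.slice (PySem.Str.split₀ value) none (some 4)
  if sides = [] then []
  else List.zip ["top", "right", "bottom", "left"] (pvPad sides)

-- ===== PRECONDITION & SPEC =====
def Spec_expand_box_shorthand_py (value : String) (out : List (String × String)) : Prop := out = expand_box_shorthand_py_alt value
instance (value : String) (out : List (String × String)) : Decidable (Spec_expand_box_shorthand_py value out) := by unfold Spec_expand_box_shorthand_py; infer_instance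

-- ===== CLAIM (what is proved, stated in full; the proofs are below) =====
def Claim_equal_expand_box_shorthand_py : Prop := ∀ (value : String), Dom_expand_box_shorthand_py value → Spec_expand_box_shorthand_py value (expand_box_shorthand_py value)

-- ===== LEMMAS AND PROOFS =====

-- split₀.go never produces an empty piece (pieces are pushed only when cur is nonempty)
theorem split0_go_ne_nil (s cur : List Char) (acc : List (List Char))
    (hacc : ∀ p ∈ acc, p ≠ []) :
    ∀ p ∈ PySem.Chars.split₀.go s cur acc, p ≠ ([] : List Char) := by
  induction s generalizing cur acc with
  | nil =>
    intro p hp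
    unfold PySem.Chars.split₀.go at hp
    split_ifs at hp with h
    · exact hacc p (List.mem_reverse.mp hp)
    · rcases List.mem_cons.mp (List.mem_reverse.mp hp) with h' | h'
      · simp_all [List.isEmpty_iff]
      · exact hacc p h'
  | cons c rest ih =>
    intro p hp
    unfold PySem.Chars.split₀.go at hp
    split_ifs at hp with h1 h2
    · exact ih [] acc hacc p hp
    · refine ih [] (cur.reverse :: acc) ?_ p hp
      intro q hq
      rcases List.mem_cons.mp hq with h' | h'
      · simp_all [List.isEmpty_iff]
      · exact hacc q h'
    · exact ih (c :: cur) acc hacc p hp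

theorem mem_split0_ne_empty (value : String) :
    ∀ p ∈ PySem.Str.split₀ value, p ≠ "" := by
  intro p hp
  unfold PySem.Str.split₀ PySem.Chars.split₀ at hp
  rcases List.mem_map.mp hp with ⟨q, hq, rfl⟩
  have hne := split0_go_ne_nil value.toList [] [] (by simp) q hq
  intro h
  apply hne
  have : (String.ofList q).toList = ("" : String).toList := by rw [h]
  simpa using this

theorem filter_split0 (value : String) :
    (PySem.Str.split₀ value).filter (fun p => p ≠ "") = PySem.Str.split₀ value := by
  apply List.filter_eq_self.mpr
  intro p hp
  simpa using mem_split0_ne_empty value p hp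

theorem pvPad_one (a : String) : pvPad [a] = [a, a, a, a] := by
  rw [pvPad]; simp [PySem.List.pyGetD, PySem.List.pyGet?, PySem.List.pyIdx?]
  rw [pvPad]; simp [PySem.List.pyGetD, PySem.List.pyGet?, PySem.List.pyIdx?]
  rw [pvPad]; simp [PySem.List.pyGetD, PySem.List.pyGet?, PySem.List.pyIdx?]
  rw [pvPad]; simp

theorem pvPad_two (a b : String) : pvPad [a, b] = [a, b, a, b] := by
  rw [pvPad]; simp [PySem.List.pyGetD, PySem.List.pyGet?, PySem.List.pyIdx?]
  rw [pvPad]; simp [PySem.List.pyGetD, PySem.List.pyGet?, PySem.List.pyIdx?]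
  rw [pvPad]; simp

theorem pvPad_three (a b c : String) : pvPad [a, b, c] = [a, b, c, b] := by
  rw [pvPad]; simp [PySem.List.pyGetD, PySem.List.pyGet?, PySem.List.pyIdx?]
  rw [pvPad]; simp

theorem pvPad_four (a b c d : String) : pvPad [a, b, c, d] = [a, b, c, d] := by
  rw [pvPad]; simp

-- ===== VERDICT (by name: the statement is the Claim_ definition above) =====
theorem expand_box_shorthand_py_spec : Claim_equal_expand_box_shorthand_py := by
  unfold Claim_equal_expand_box_shorthand_py
  intro value _
  unfold Spec_expand_box_shorthand_py expand_box_shorthand_py expand_box_shorthand_py_alt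
  rw [filter_split0]
  generalize PySem.Str.split₀ value = parts
  match parts with
  | [] => rfl
  | [a] =>
    have hs : PySem.List.slice [a] none (some 4) = [a] := by
      rw [PySem.List.slice_to _ (by norm_num : (0:Int) ≤ 4)]; rfl
    simp [hs, pvPad_one, List.zip]
  | [a, b] =>
    have hs : PySem.List.slice [a, b] none (some 4) = [a, b] := by
      rw [PySem.List.slice_to _ (by norm_num : (0:Int) ≤ 4)]; rfl
    simp [hs, pvPad_two, List.zip]
  | [a, b, c] =>
    have hs : PySem.List.slice [a, b, c] none (some 4) = [a, b, c] := by
      rw [PySem.List.slice_to _ (by norm_num : (0:Int) ≤ 4)]; rfl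
    simp [hs, pvPad_three, List.zip]
  | a :: b :: c :: d :: rest =>
    have hslice : PySem.List.slice (a :: b :: c :: d :: rest) none (some 4) = [a, b, c, d] := by
      rw [PySem.List.slice_to _ (by norm_num : (0:Int) ≤ 4)]; rfl
    have hif1 : ¬((a :: b :: c :: d :: rest).length = 1) := by simp
    have hif2 : ¬((a :: b :: c :: d :: rest).length = 2) := by simp
    have hif3 : ¬((a :: b :: c :: d :: rest).length = 3) := by simp
    simp only [hslice, hif1, hif2, hif3, if_false, pvPad_four, List.zip]
    rfl
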